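-- pv_equiv track=rewrite | github.com/choogiesaur/codebits | challenges/python/tricolored-towers.py | solution
-- ===== SOURCE A (Python) =====
-- from collections import defaultdict
--
-- def generate_swap(str, index1, index2):
--     arr = [str[0], str[1], str[2]]
--     temp = arr[index1]
--     arr[index1] = arr[index2]
--     arr[index2] = temp
--     return arr[0] + arr[1] + arr[2]
--
-- def solution(T):
--     # For each stack, generate possible block combinations
--     # and update hashtable with their counts
--     counts = defaultdict(int)
--     highest_occurrences = 0
--
--     for stack in T:
--         alt_stack1 = generate_swap(stack, 0, 1)
--         alt_stack2 = generate_swap(stack, 1, 2)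
--
--         counts[stack] += 1
--         if alt_stack1 != stack:
--             counts[alt_stack1] += 1
--         if alt_stack2 != stack:
--             counts[alt_stack2] += 1
--
--         highest_occurrences = max(highest_occurrences, counts[stack], counts[alt_stack1], counts[alt_stack2])
--
--     return highest_occurrences
-- ===== SOURCE B (Python) =====
-- def solution(T):
--     # Pass 1: flatten each stack into itself plus its distinct adjacent-swap variants.
--     stream = []
--     for stack in T:
--         alt1 = stack[1] + stack[0] + stack[2]
--         alt2 = stack[0] + stack[2] + stack[1]
--         stream.append(stack)
--         if alt1 != stack:
--             stream.append(alt1)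
--         if alt2 != stack:
--             stream.append(alt2)
--     # Pass 2: sort the stream; equal keys become contiguous, so the answer is the
--     # longest run of equal adjacent elements (no hash table needed).
--     best = 0
--     run = 0
--     prev = None
--     for v in sorted(stream):
--         run = run + 1 if v == prev else 1
--         if run > best:
--             best = run
--         prev = v
--     return best
-- ===== Notes on version B (the rewrite author's own statement) =====
-- stated objective: alternative
-- what changed: A counts occurrences in a hash table (defaultdict) while tracking a running maximum inside one loop; B uses no dictionary at all: it flattens the stacks into a stream of variant strings, sorts the stream so equal keys become contiguous, and returns the length of the longest run of equal adjacent elements.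
import Mathlib
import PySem

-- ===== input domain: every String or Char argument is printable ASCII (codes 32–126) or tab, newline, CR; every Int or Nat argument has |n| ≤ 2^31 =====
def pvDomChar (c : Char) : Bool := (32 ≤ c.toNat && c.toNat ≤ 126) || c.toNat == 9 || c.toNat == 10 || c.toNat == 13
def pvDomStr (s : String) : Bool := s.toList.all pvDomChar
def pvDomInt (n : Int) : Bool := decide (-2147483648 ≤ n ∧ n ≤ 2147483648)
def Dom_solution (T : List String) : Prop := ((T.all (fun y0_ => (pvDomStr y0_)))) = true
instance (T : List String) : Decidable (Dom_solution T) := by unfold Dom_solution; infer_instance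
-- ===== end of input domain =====

-- B replaces A's hash-table counting with a running maximum by a sort-then-scan: flatten the
-- stacks into a stream of variant strings, sort it, and take the longest run of equal adjacent
-- elements (alternative algorithm; no dictionary).


-- ===== PORT A =====
-- Python's str[i] yields a 1-char string; here chars. pyGetD/pySetD are the total forms of
-- xs[i] / xs[i]=v, faithful under Pre_solution (every string has length ≥ 3, indices are 0..2).
def generate_swap (str : String) (index1 : Int) (index2 : Int) : String :=
  let arr := [PySem.List.pyGetD str.toList 0 ' ', PySem.List.pyGetD str.toList 1 ' ',
              PySem.List.pyGetD str.toList 2 ' ']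
  let temp := PySem.List.pyGetD arr index1 ' '
  let arr := PySem.List.pySetD arr index1 (PySem.List.pyGetD arr index2 ' ')
  let arr := PySem.List.pySetD arr index2 temp
  -- arr[0] + arr[1] + arr[2] : concatenation of three 1-char strings
  String.ofList [PySem.List.pyGetD arr 0 ' ', PySem.List.pyGetD arr 1 ' ', PySem.List.pyGetD arr 2 ' ']

-- the body of A's 'for stack in T' loop (counts, highest_occurrences are the two accumulators)
def solutionStep (st : PySem.Dict String Int × Int) (stack : String) :
    PySem.Dict String Int × Int :=
  let alt_stack1 := generate_swap stack 0 1
  let alt_stack2 := generate_swap stack 1 2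
  let counts := st.1.insert stack (st.1.getD stack 0 + 1)                 -- counts[stack] += 1
  let counts := if alt_stack1 ≠ stack then
      counts.insert alt_stack1 (counts.getD alt_stack1 0 + 1) else counts
  let counts := if alt_stack2 ≠ stack then
      counts.insert alt_stack2 (counts.getD alt_stack2 0 + 1) else counts
  (counts, max (max (max st.2 (counts.getD stack 0)) (counts.getD alt_stack1 0))
      (counts.getD alt_stack2 0))

def solution (T : List String) : Int :=
  (T.foldl solutionStep (PySem.Dict.empty, 0)).2

-- ===== PORT B =====
-- Pass 1 of Source B: stream of each stack plus its distinct adjacent-swap variants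
-- (alt1 = stack[1]+stack[0]+stack[2], alt2 = stack[0]+stack[2]+stack[1]).
def streamStep (acc : List String) (stack : String) : List String :=
  let alt1 := String.ofList [PySem.List.pyGetD stack.toList 1 ' ', PySem.List.pyGetD stack.toList 0 ' ',
                             PySem.List.pyGetD stack.toList 2 ' ']
  let alt2 := String.ofList [PySem.List.pyGetD stack.toList 0 ' ', PySem.List.pyGetD stack.toList 2 ' ',
                             PySem.List.pyGetD stack.toList 1 ' ']
  ((acc ++ [stack]) ++ (if alt1 ≠ stack then [alt1] else []))
    ++ (if alt2 ≠ stack then [alt2] else [])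

-- Pass 2 of Source B: longest run of equal adjacent elements; state = (best, run, prev)
def runStep (st : Int × Int × Option String) (v : String) : Int × Int × Option String :=
  let run := if some v = st.2.2 then st.2.1 + 1 else 1
  let best := if run > st.1 then run else st.1
  (best, run, some v)

def solution_alt (T : List String) : Int :=
  let stream := T.foldl streamStep []
  ((PySem.List.sorted stream (fun x => x) false).foldl runStep (0, 0, none)).1

-- ===== PRECONDITION & SPEC =====
-- Pre_: every string has at least 3 characters; Python's A raises IndexError otherwise.
def Pre_solution (T : List String) : Prop := ∀ s ∈ T, 3 ≤ s.toList.length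
instance (T : List String) : Decidable (Pre_solution T) := by unfold Pre_solution; infer_instance
def pvWitness_solution : List String := ["abc", "bac", "abc"]

def Spec_solution (T : List String) (out : Int) : Prop := out = solution_alt T
instance (T : List String) (out : Int) : Decidable (Spec_solution T out) := by unfold Spec_solution; infer_instance

-- ===== CLAIM (what is proved, stated in full; the proofs are below) =====
def Claim_equal_solution : Prop := ∀ (T : List String), Dom_solution T → Pre_solution T → Spec_solution T (solution T)

-- ===== LEMMAS AND PROOFS =====

-- proof-only names for the two swapped variants
def swapA (s : String) : String := String.ofList [s.toList.getD 1 ' ', s.toList.getD 0 ' ', s.toList.getD 2 ' ']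
def swapB (s : String) : String := String.ofList [s.toList.getD 0 ' ', s.toList.getD 2 ' ', s.toList.getD 1 ' ']

-- the contribution of one stack to the key stream
def vlist (s : String) : List String :=
  [s] ++ (if swapA s ≠ s then [swapA s] else []) ++ (if swapB s ≠ s then [swapB s] else [])

-- the maximum count over a list of keys (0 when empty)
def Mx (p : List String) : Int := (p.map (fun k => ((p.count k : Nat) : Int))).foldl max 0

lemma gs01 (s : String) : generate_swap s 0 1 = swapA s := by
  simp [generate_swap, swapA, PySem.List.pyGetD_ofNat', PySem.List.pySetD, PySem.List.pySet?, PySem.List.pyIdx?]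

lemma gs12 (s : String) : generate_swap s 1 2 = swapB s := by
  simp [generate_swap, swapB, PySem.List.pyGetD_ofNat', PySem.List.pySetD, PySem.List.pySet?, PySem.List.pyIdx?]

lemma mx_nonneg (p : List String) : 0 ≤ Mx p := (PySem.List.le_foldl_max _ 0).1

lemma count_le_mx {p : List String} {k : String} (h : k ∈ p) : (p.count k : Int) ≤ Mx p :=
  (PySem.List.le_foldl_max _ 0).2 _ (List.mem_map.2 ⟨k, h, rfl⟩)

lemma mx_le {p : List String} {b : Int} (h0 : 0 ≤ b)
    (h : ∀ k ∈ p, (p.count k : Int) ≤ b) : Mx p ≤ b := by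
  rcases PySem.List.foldl_max_mem (p.map (fun k => ((p.count k : Nat) : Int))) 0 with he | hm
  · rw [Mx, he]; exact h0
  · rcases List.mem_map.1 hm with ⟨k, hk, hv⟩
    rw [Mx, ← hv]; exact h k hk

lemma mem_vlist {k s : String} (h : k ∈ vlist s) :
    k = s ∨ k = swapA s ∨ k = swapB s := by
  unfold vlist at h
  split_ifs at h <;> simp_all <;> tauto

lemma self_mem_vlist (s : String) : s ∈ vlist s := by
  unfold vlist; simp

lemma swapA_mem_vlist {s : String} (h : swapA s ≠ s) : swapA s ∈ vlist s := by
  unfold vlist; simp [h]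

lemma swapB_mem_vlist {s : String} (h : swapB s ≠ s) : swapB s ∈ vlist s := by
  unfold vlist; simp [h]

-- A's running maximum after absorbing the three reads equals the maximum count
-- over the extended key stream
lemma mx_append (p : List String) (t : String) :
    max (max (max (Mx p) (((p ++ vlist t).count t : Nat) : Int))
        (((p ++ vlist t).count (swapA t) : Nat) : Int))
      (((p ++ vlist t).count (swapB t) : Nat) : Int) = Mx (p ++ vlist t) := by
  set q := p ++ vlist t with hq
  have hmem : ∀ k : String, k ∈ vlist t → (↑(q.count k) : Int) ≤ Mx q := by
    intro k hk
    exact count_le_mx (by rw [hq]; exact List.mem_append_right _ hk)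
  apply le_antisymm
  · have hp : Mx p ≤ Mx q := by
      apply mx_le (mx_nonneg q)
      intro k hk
      have h1 : p.count k ≤ q.count k := by
        rw [hq, List.count_append]; omega
      calc ((p.count k : Nat) : Int) ≤ ((q.count k : Nat) : Int) := by exact_mod_cast h1
        _ ≤ Mx q := count_le_mx (by rw [hq]; exact List.mem_append_left _ hk)
    have ht : (↑(q.count t) : Int) ≤ Mx q := hmem t (self_mem_vlist t)
    have hA : (↑(q.count (swapA t)) : Int) ≤ Mx q := by
      by_cases h : swapA t = t
      · rw [h]; exact ht
      · exact hmem _ (swapA_mem_vlist h)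
    have hB : (↑(q.count (swapB t)) : Int) ≤ Mx q := by
      by_cases h : swapB t = t
      · rw [h]; exact ht
      · exact hmem _ (swapB_mem_vlist h)
    omega
  · apply mx_le
    · have := mx_nonneg p; omega
    · intro k hk
      rw [hq] at hk
      rcases List.mem_append.1 hk with hkp | hkv
      · by_cases hv : k ∈ vlist t
        · rcases mem_vlist hv with h | h | h <;> rw [h] <;> omega
        · have hcnt : q.count k = p.count k := by
            rw [hq, List.count_append, List.count_eq_zero.2 hv, Nat.add_zero]
          have : (↑(p.count k) : Int) ≤ Mx p := count_le_mx hkp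
          rw [hcnt]; omega
      · rcases mem_vlist hkv with h | h | h <;> rw [h] <;> omega

lemma counter_append (p v : List String) :
    PySem.Dict.counter (p ++ v)
      = v.foldl (fun d k => d.insert k (d.getD k 0 + 1)) (PySem.Dict.counter p) := by
  rw [← PySem.Dict.foldl_insert_getD_add_one_eq_counter,
      ← PySem.Dict.foldl_insert_getD_add_one_eq_counter, List.foldl_append]

lemma step_eq (p : List String) (t : String) :
    solutionStep (PySem.Dict.counter p, Mx p) t
      = (PySem.Dict.counter (p ++ vlist t), Mx (p ++ vlist t)) := by
  have hd : (solutionStep (PySem.Dict.counter p, Mx p) t).1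
      = PySem.Dict.counter (p ++ vlist t) := by
    rw [counter_append]
    by_cases h1 : swapA t ≠ t <;> by_cases h2 : swapB t ≠ t <;>
      simp [solutionStep, vlist, gs01, gs12, h1, h2]
  have hcnt : ∀ k : String,
      (PySem.Dict.counter (p ++ vlist t)).getD k 0 = (((p ++ vlist t).count k : Nat) : Int) :=
    fun k => PySem.Dict.getD_counter _ k
  have hm : (solutionStep (PySem.Dict.counter p, Mx p) t).2 = Mx (p ++ vlist t) := by
    have : (solutionStep (PySem.Dict.counter p, Mx p) t).2
        = max (max (max (Mx p)
            ((solutionStep (PySem.Dict.counter p, Mx p) t).1.getD t 0))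
            ((solutionStep (PySem.Dict.counter p, Mx p) t).1.getD (swapA t) 0))
            ((solutionStep (PySem.Dict.counter p, Mx p) t).1.getD (swapB t) 0) := by
      simp [solutionStep, gs01, gs12]
    rw [this, hd, hcnt, hcnt, hcnt, mx_append]
  exact Prod.ext hd hm

lemma loop_eq (T : List String) : ∀ (p : List String),
    T.foldl solutionStep (PySem.Dict.counter p, Mx p)
      = (PySem.Dict.counter (p ++ T.flatMap vlist), Mx (p ++ T.flatMap vlist)) := by
  induction T with
  | nil => intro p; simp
  | cons t T ih =>
    intro p
    rw [List.foldl_cons, step_eq, ih (p ++ vlist t)]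
    simp [List.append_assoc]

lemma solution_eq_mx (T : List String) : solution T = Mx (T.flatMap vlist) := by
  have h0 : (PySem.Dict.empty : PySem.Dict String Int) = PySem.Dict.counter [] := rfl
  have h1 : (0 : Int) = Mx [] := rfl
  rw [solution, h0, h1, loop_eq T [], List.nil_append]

-- B's pass 1 builds exactly the flattened variant stream
lemma streamStep_eq (acc : List String) (t : String) :
    streamStep acc t = acc ++ vlist t := by
  by_cases h1 : swapA t ≠ t <;> by_cases h2 : swapB t ≠ t <;>
    simp [streamStep, vlist, swapA, swapB, PySem.List.pyGetD_ofNat']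

lemma stream_eq (T : List String) : ∀ (acc : List String),
    T.foldl streamStep acc = acc ++ T.flatMap vlist := by
  induction T with
  | nil => intro acc; simp
  | cons t T ih =>
    intro acc
    rw [List.foldl_cons, streamStep_eq, ih]
    simp [List.append_assoc]

-- Mx depends only on the multiset of keys
lemma mx_perm {p q : List String} (h : p.Perm q) : Mx p = Mx q := by
  have key : ∀ {a b : List String}, a.Perm b → Mx a ≤ Mx b := by
    intro a b hab
    apply mx_le (mx_nonneg b)
    intro k hk
    rw [hab.count_eq]
    exact count_le_mx (hab.mem_iff.1 hk)
  exact le_antisymm (key h) (key h.symm)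

-- appending one key: the max count grows to the new key's count if that is larger
lemma mx_snoc (p : List String) (v : String) :
    Mx (p ++ [v]) = max (Mx p) (((p ++ [v]).count v : Nat) : Int) := by
  apply le_antisymm
  · apply mx_le
    · have := mx_nonneg p; omega
    · intro k hk
      by_cases hkv : k = v
      · subst hkv; omega
      · have hc0 : List.count k [v] = 0 := List.count_eq_zero.2 (by simp [hkv])
        have hcnt : (p ++ [v]).count k = p.count k := by
          rw [List.count_append, hc0]; omega
        rcases List.mem_append.1 hk with hkp | hkv'
        · have := count_le_mx hkp; rw [hcnt]; omega
        · simp at hkv'; exact absurd hkv' hkv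
  · have h1 : Mx p ≤ Mx (p ++ [v]) := by
      apply mx_le (mx_nonneg _)
      intro k hk
      have hc : p.count k ≤ (p ++ [v]).count k := by rw [List.count_append]; omega
      calc ((p.count k : Nat) : Int) ≤ (((p ++ [v]).count k : Nat) : Int) := by exact_mod_cast hc
        _ ≤ Mx (p ++ [v]) := count_le_mx (List.mem_append_left _ hk)
    have h2 : (((p ++ [v]).count v : Nat) : Int) ≤ Mx (p ++ [v]) :=
      count_le_mx (List.mem_append_right _ (by simp))
    omega

-- the run length the scan carries: count of the last element seen (0 before any)
def runOf (p : List String) : Int :=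
  match p.getLast? with
  | none => 0
  | some l => ((p.count l : Nat) : Int)

-- in a sorted prefix p whose elements are all ≤ v, a v different from the last element is new
lemma not_mem_of_sorted {p : List String} {v : String}
    (hp : p.Pairwise (· ≤ ·)) (hle : ∀ x ∈ p, x ≤ v) (hlast : p.getLast? ≠ some v) :
    v ∉ p := by
  intro hv
  cases hq : p.getLast? with
  | none => rw [List.getLast?_eq_none_iff.1 hq] at hv; simp at hv
  | some l =>
    have hlv : l ≠ v := fun h => hlast (by rw [hq, h])
    have hlmem : l ∈ p := List.mem_of_getLast? hq
    have hl_le : l ≤ v := hle l hlmem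
    -- p = q ++ [l]; v ∈ q since v ≠ l, so v ≤ l by pairwise
    have hpne : p ≠ [] := by rintro rfl; simp at hq
    have hsplit : p.dropLast ++ [l] = p := List.dropLast_append_getLast? l hq
    set q := p.dropLast with hqd
    rw [← hsplit] at hv hp
    have hvq : v ∈ q := by
      rcases List.mem_append.1 hv with h | h
      · exact h
      · simp at h; exact absurd h.symm hlv
    have hvl : v ≤ l := (List.pairwise_append.1 hp).2.2 v hvq l (by simp)
    exact hlv (le_antisymm hvl hl_le).symm

-- invariant of B's run scan over a sorted list
lemma scan_inv (rest : List String) : ∀ (p : List String),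
    (p ++ rest).Pairwise (· ≤ ·) →
    rest.foldl runStep (Mx p, runOf p, p.getLast?)
      = (Mx (p ++ rest), runOf (p ++ rest), (p ++ rest).getLast?) := by
  induction rest with
  | nil => intro p _; simp
  | cons v rest ih =>
    intro p hpw
    have hstep : runStep (Mx p, runOf p, p.getLast?) v
        = (Mx (p ++ [v]), runOf (p ++ [v]), (p ++ [v]).getLast?) := by
      have hcv : (p ++ [v]).count v = p.count v + 1 := by
        rw [List.count_append]; simp
      have hlast' : (p ++ [v]).getLast? = some v := by simp
      have hrO : runOf (p ++ [v]) = (((p ++ [v]).count v : Nat) : Int) := by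
        simp [runOf, hlast']
      have hrun : (if some v = p.getLast? then runOf p + 1 else 1)
          = runOf (p ++ [v]) := by
        by_cases hl : some v = p.getLast?
        · have hrp : runOf p = ((p.count v : Nat) : Int) := by
            simp [runOf, ← hl]
          rw [if_pos hl, hrp, hrO, hcv]
          push_cast; ring
        · have hvp : v ∉ p := by
            apply not_mem_of_sorted (hpw.sublist (by simp))
              (fun x hx => (List.pairwise_append.1 hpw).2.2 x hx v (by simp))
            exact fun h => hl h.symm
          rw [if_neg hl, hrO, hcv, List.count_eq_zero.2 hvp]
          simp
      have hbest : (if Mx p < runOf (p ++ [v]) then runOf (p ++ [v]) else Mx p)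
          = Mx (p ++ [v]) := by
        rw [mx_snoc, ← hrO]
        split_ifs with h
        · exact (max_eq_right h.le).symm
        · exact (max_eq_left (not_lt.1 h)).symm
      simp only [runStep, hrun]
      rw [hbest]
      simp
    rw [List.foldl_cons, hstep, ih (p ++ [v]) (by simpa using hpw)]
    simp

lemma solution_alt_eq_mx (T : List String) : solution_alt T = Mx (T.flatMap vlist) := by
  rw [solution_alt, stream_eq T [], List.nil_append]
  set s := PySem.List.sorted (T.flatMap vlist) (fun x => x) false with hs
  have hperm : s.Perm (T.flatMap vlist) := PySem.List.sorted_perm _ _ _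
  have hpw : s.Pairwise (· ≤ ·) := by
    have := PySem.List.sorted_pairwise (xs := T.flatMap vlist) (key := fun x => x)
    simpa [hs] using this
  have h0 : ((0 : Int), (0 : Int), (none : Option String))
      = (Mx [], runOf [], ([] : List String).getLast?) := by simp [Mx, runOf]
  rw [h0]
  have := scan_inv s [] (by simpa using hpw)
  simp only [List.nil_append] at this
  rw [this]
  exact mx_perm hperm

-- ===== VERDICT (by name: the statement is the Claim_ definition above) =====
theorem solution_spec : Claim_equal_solution := by
  intro T _ _
  unfold Spec_solution
  rw [solution_eq_mx, solution_alt_eq_mx]
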